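-- pv_equiv track=rewrite | github.com/willlindsey05/noteagator | src/noteagator/print_utils.py | add_copy_markers_slim
-- ===== SOURCE A (Python) =====
-- def add_copy_markers_slim(markdown_content: str) -> str:
--     lines = markdown_content.splitlines()
--     out = []
--     in_code = False
--     first_in_block = False
--     block_idx = 1
--
--     def indent_for(i: int) -> str:
--         return " " * len(f"--copy {i} ")
--
--     for line in lines:
--         if line.startswith("```"):
--             if not in_code:
--                 in_code = True
--                 first_in_block = True
--             else:
--                 in_code = False
--                 block_idx += 1
--             continue
--
--         if in_code:
--             if first_in_block:
--                 out.append(f"--copy {block_idx} $ {line}")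
--                 first_in_block = False
--             else:
--                 out.append(f"{indent_for(block_idx)}$ {line}")
--         else:
--             out.append(line)
--
--     return "\n".join(out)
-- ===== SOURCE B (Python) =====
-- def add_copy_markers_slim(markdown_content: str) -> str:
--     # Partition the lines into alternating non-code / code segments at the
--     # fence lines (the fences themselves are discarded), then render the
--     # segments: non-code verbatim, the k-th code segment with copy markers.
--     segments = []
--     current = []
--     for line in markdown_content.splitlines():
--         if line.startswith("```"):
--             segments.append(current)
--             current = []
--         else:
--             current.append(line)
--     segments.append(current)
--
--     out = []
--     for i, seg in enumerate(segments):
--         if i % 2 == 0: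
--             out.extend(seg)
--         else:
--             k = i // 2 + 1
--             for j, line in enumerate(seg):
--                 if j == 0:
--                     out.append(f"--copy {k} $ {line}")
--                 else:
--                     out.append(" " * len(f"--copy {k} ") + "$ " + line)
--     return "\n".join(out)
-- ===== Notes on version B (the rewrite author's own statement) =====
-- stated objective: alternative
-- what changed: Replaces A's single emit loop with mutable in_code/first_in_block/block_idx state by a two-pass design: first partition the lines into alternating non-code/code segments at the fence lines, then render each segment by its position (even index verbatim, odd index as code block number i//2+1).
import Mathlib
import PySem

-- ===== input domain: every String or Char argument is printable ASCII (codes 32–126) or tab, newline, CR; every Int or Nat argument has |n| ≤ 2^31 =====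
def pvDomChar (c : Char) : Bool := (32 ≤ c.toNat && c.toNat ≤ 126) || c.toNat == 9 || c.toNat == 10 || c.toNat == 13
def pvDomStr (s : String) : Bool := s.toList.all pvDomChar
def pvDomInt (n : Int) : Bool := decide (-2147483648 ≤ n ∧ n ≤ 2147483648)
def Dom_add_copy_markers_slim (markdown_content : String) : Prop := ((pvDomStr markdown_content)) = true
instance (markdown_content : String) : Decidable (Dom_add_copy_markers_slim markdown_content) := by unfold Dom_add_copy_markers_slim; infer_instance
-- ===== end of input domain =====

-- B replaces A's single emit loop with mutable toggling state by a two-pass design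
-- (partition the lines into alternating segments at the fences, then render by segment
-- position); same cost, different decomposition.


-- ===== PORT A =====
-- indent_for(i) = " " * len(f"--copy {i} ")
def acms_indent_for (i : Int) : String :=
  String.mk (List.replicate (PySem.Str.len ("--copy " ++ PySem.Int.toStr i ++ " ")).toNat ' ')

-- loop body over state (out, in_code, first_in_block, block_idx)
def acms_step (st : List String × Bool × Bool × Int) (line : String) :
    List String × Bool × Bool × Int :=
  let (out, in_code, first, idx) := st
  if PySem.Str.startswith line "```" then
    if !in_code then (out, true, true, idx)
    else (out, false, first, idx + 1)
  else
    if in_code then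
      if first then (out ++ ["--copy " ++ PySem.Int.toStr idx ++ " $ " ++ line], in_code, false, idx)
      else (out ++ [acms_indent_for idx ++ "$ " ++ line], in_code, first, idx)
    else (out ++ [line], in_code, first, idx)

def add_copy_markers_slim (markdown_content : String) : String :=
  let lines := PySem.Str.splitlines markdown_content
  let st := lines.foldl acms_step ([], false, false, 1)
  PySem.Str.join "\n" st.1

-- ===== PORT B =====
-- partition the lines into alternating non-code/code segments at fence lines
def acms_alt_split (lines : List String) : List (List String) :=
  let p := lines.foldl
    (fun (p : List (List String) × List String) line =>
      if PySem.Str.startswith line "```" then (p.1 ++ [p.2], [])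
      else (p.1, p.2 ++ [line])) ([], [])
  p.1 ++ [p.2]

def acms_alt_marker (k : Int) (line : String) : String :=
  "--copy " ++ PySem.Int.toStr k ++ " $ " ++ line

def acms_alt_indent (k : Int) (line : String) : String :=
  String.mk (List.replicate (PySem.Str.len ("--copy " ++ PySem.Int.toStr k ++ " ")).toNat ' ')
    ++ "$ " ++ line

def add_copy_markers_slim_alt (markdown_content : String) : String :=
  let segments := acms_alt_split (PySem.Str.splitlines markdown_content)
  let out := (PySem.List.enumerate segments).foldl
    (fun out iseg =>
      if PySem.Int.mod iseg.1 2 == 0 then out ++ iseg.2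
      else
        let k := PySem.Int.floordiv iseg.1 2 + 1
        (PySem.List.enumerate iseg.2).foldl
          (fun out jl =>
            if jl.1 == 0 then out ++ [acms_alt_marker k jl.2]
            else out ++ [acms_alt_indent k jl.2]) out) []
  PySem.Str.join "\n" out

-- ===== PRECONDITION & SPEC =====
def Spec_add_copy_markers_slim (markdown_content : String) (out : String) : Prop := out = add_copy_markers_slim_alt markdown_content
instance (markdown_content : String) (out : String) : Decidable (Spec_add_copy_markers_slim markdown_content out) := by unfold Spec_add_copy_markers_slim; infer_instance

-- ===== CLAIM (what is proved, stated in full; the proofs are below) =====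
def Claim_equal_add_copy_markers_slim : Prop := ∀ (markdown_content : String), Dom_add_copy_markers_slim markdown_content → Spec_add_copy_markers_slim markdown_content (add_copy_markers_slim markdown_content)

-- ===== LEMMAS AND PROOFS =====

-- reference rendering of the remaining lines from A's loop state (p, f, k)
def acms_rr (p f : Bool) (k : Int) : List String → List String
  | [] => []
  | l :: ls =>
    if PySem.Str.startswith l "```" then
      if !p then acms_rr true true k ls
      else acms_rr false f (k + 1) ls
    else if p then
      (if f then acms_alt_marker k l else acms_alt_indent k l) :: acms_rr p false k ls
    else l :: acms_rr p f k ls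

-- recursive form of B's partition
def acms_splitRec : List String → List (List String)
  | [] => [[]]
  | l :: ls =>
    if PySem.Str.startswith l "```" then [] :: acms_splitRec ls
    else (l :: (acms_splitRec ls).headI) :: (acms_splitRec ls).tail

-- rendering of a single code segment, flag f = "first line still pending"
def acms_markIndent (k : Int) (f : Bool) : List String → List String
  | [] => []
  | l :: ls =>
    (if f then acms_alt_marker k l else acms_alt_indent k l) :: acms_markIndent k false ls

-- rendering of the segment list from state (p = in code, f = first line pending, k = block idx)
def acms_renderSegs (p f : Bool) (k : Int) : List (List String) → List String
  | [] => []
  | s :: ss =>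
    (if p then acms_markIndent k f s else s)
      ++ acms_renderSegs (!p) true (if p then k + 1 else k) ss

theorem acms_splitRec_ne_nil (ls : List String) : acms_splitRec ls ≠ [] := by
  cases ls with
  | nil => simp [acms_splitRec]
  | cons l ls => unfold acms_splitRec; split <;> simp

-- A's foldl equals out ++ acms_rr of the remaining lines
theorem acms_foldl_eq_rr (ls : List String) :
    ∀ (out : List String) (p f : Bool) (k : Int),
      (ls.foldl acms_step (out, p, f, k)).1 = out ++ acms_rr p f k ls := by
  induction ls with
  | nil => intro out p f k; simp [acms_rr]
  | cons l ls ih =>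
    intro out p f k
    by_cases hf : PySem.Chars.startswith l.toList ['`', '`', '`'] = true
    · cases p <;>
        simp [acms_step, acms_rr, hf, ih]
    · cases p <;> cases f <;>
        simp [acms_step, acms_rr, hf, ih, acms_alt_marker, acms_alt_indent, acms_indent_for,
          List.append_assoc]

-- acms_rr with p = false does not depend on f
theorem acms_rr_false (ls : List String) :
    ∀ (f f' : Bool) (k : Int), acms_rr false f k ls = acms_rr false f' k ls := by
  induction ls with
  | nil => intro f f' k; simp [acms_rr]
  | cons l ls ih =>
    intro f f' k
    unfold acms_rr
    split
    · simp
    · simp [ih f f']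

theorem acms_fence_eq (l : String) :
    PySem.Str.startswith l "```" = PySem.Chars.startswith l.toList ['`', '`', '`'] := by
  simp [PySem.Str.startswith_eq]

-- B's partition fold equals acms_splitRec
theorem acms_split_fold (ls : List String) :
    ∀ (segs : List (List String)) (cur : List String),
      (ls.foldl (fun (p : List (List String) × List String) line =>
          if PySem.Str.startswith line "```" then (p.1 ++ [p.2], [])
          else (p.1, p.2 ++ [line])) (segs, cur)).1
        ++ [(ls.foldl (fun (p : List (List String) × List String) line =>
          if PySem.Str.startswith line "```" then (p.1 ++ [p.2], [])
          else (p.1, p.2 ++ [line])) (segs, cur)).2]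
      = segs ++ (acms_splitRec ls).modifyHead (cur ++ ·) := by
  induction ls with
  | nil => intro segs cur; simp [acms_splitRec]
  | cons l ls ih =>
    intro segs cur
    simp only [List.foldl_cons]
    by_cases hf : PySem.Chars.startswith l.toList ['`', '`', '`'] = true
    · rw [show (if PySem.Str.startswith l "```" = true then (segs ++ [cur], ([] : List String))
            else (segs, cur ++ [l])) = (segs ++ [cur], ([] : List String)) from by
          simp [hf]]
      rw [ih]
      rw [show acms_splitRec (l :: ls) = [] :: acms_splitRec ls from by
          simp [acms_splitRec, hf]]
      obtain ⟨t, ts, hs⟩ := List.exists_cons_of_ne_nil (acms_splitRec_ne_nil ls)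
      simp [hs]
    · rw [show (if PySem.Str.startswith l "```" = true then (segs ++ [cur], ([] : List String))
            else (segs, cur ++ [l])) = (segs, cur ++ [l]) from by
          simp [hf]]
      rw [ih]
      rw [show acms_splitRec (l :: ls)
            = (l :: (acms_splitRec ls).headI) :: (acms_splitRec ls).tail from by
          simp [acms_splitRec, hf]]
      obtain ⟨t, ts, hs⟩ := List.exists_cons_of_ne_nil (acms_splitRec_ne_nil ls)
      simp [hs]

-- acms_rr equals segment-wise rendering of the partition
theorem acms_rr_eq_renderSegs (ls : List String) :
    ∀ (p f : Bool) (k : Int),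
      acms_rr p f k ls = acms_renderSegs p f k (acms_splitRec ls) := by
  induction ls with
  | nil =>
    intro p f k
    cases p <;> simp [acms_rr, acms_splitRec, acms_renderSegs, acms_markIndent]
  | cons l ls ih =>
    intro p f k
    obtain ⟨t, ts, hs⟩ := List.exists_cons_of_ne_nil (acms_splitRec_ne_nil ls)
    by_cases hf : PySem.Chars.startswith l.toList ['`', '`', '`'] = true
    · rw [show acms_splitRec (l :: ls) = [] :: acms_splitRec ls from by
          simp [acms_splitRec, hf]]
      cases p
      · simp [acms_rr, acms_renderSegs, hf, ih]
      · rw [acms_rr, acms_fence_eq, if_pos hf]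
        norm_num
        rw [acms_rr_false ls f true (k + 1), ih]
        simp [acms_renderSegs, acms_markIndent]
    · rw [show acms_splitRec (l :: ls)
            = (l :: (acms_splitRec ls).headI) :: (acms_splitRec ls).tail from by
          simp [acms_splitRec, hf]]
      cases p
      · have := ih false f k
        rw [hs] at this
        simp only [acms_renderSegs, Bool.false_eq_true, if_neg, not_false_iff] at this
        simp [acms_rr, acms_renderSegs, hf, hs, this]
      · have := ih true false k
        rw [hs] at this
        simp only [acms_renderSegs, if_pos] at this
        cases f <;>
          simp [acms_rr, acms_renderSegs, acms_markIndent, hf, hs, this]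

-- B's inner fold renders one code segment
theorem acms_inner_fold (k : Int) (seg : List String) :
    ∀ (out : List String) (j : Nat),
      (PySem.List.enumerate seg (j : Int)).foldl
          (fun out jl =>
            if jl.1 == 0 then out ++ [acms_alt_marker k jl.2]
            else out ++ [acms_alt_indent k jl.2]) out
        = out ++ acms_markIndent k (decide (j = 0)) seg := by
  induction seg with
  | nil => intro out j; simp [PySem.List.enumerate_nil, acms_markIndent]
  | cons l ls ih =>
    intro out j
    by_cases hj : j = 0
    · subst hj
      have h1 := ih (out ++ [acms_alt_marker k l]) 1
      simp only [Nat.cast_one] at h1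
      have h2 : (decide ((1 : Nat) = 0)) = false := by decide
      rw [h2] at h1
      simp only [beq_iff_eq] at h1
      simp [PySem.List.enumerate_cons, acms_markIndent, List.append_assoc, h1]
    · have h1 := ih (out ++ [acms_alt_indent k l]) (j + 1)
      have h2 : (decide (j + 1 = 0)) = false := by simp
      rw [h2] at h1
      push_cast at h1
      simp only [beq_iff_eq] at h1
      have h3 : (decide (j = 0)) = false := by simp [hj]
      have h4 : ((j : Int)) ≠ 0 := by exact_mod_cast hj
      simp [PySem.List.enumerate_cons, acms_markIndent, h1, hj, List.append_assoc]

theorem acms_inner_fold0 (k : Int) (seg : List String) (out : List String) :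
    (PySem.List.enumerate seg 0).foldl
        (fun out jl =>
          if jl.1 == 0 then out ++ [acms_alt_marker k jl.2]
          else out ++ [acms_alt_indent k jl.2]) out
      = out ++ acms_markIndent k true seg := by
  have h := acms_inner_fold k seg out 0
  simpa using h

-- B's outer fold renders the segment list
theorem acms_outer_fold (segs : List (List String)) :
    ∀ (out : List String) (n : Nat),
      (PySem.List.enumerate segs (n : Int)).foldl
          (fun out iseg =>
            if PySem.Int.mod iseg.1 2 == 0 then out ++ iseg.2
            else
              let k := PySem.Int.floordiv iseg.1 2 + 1
              (PySem.List.enumerate iseg.2).foldl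
                (fun out jl =>
                  if jl.1 == 0 then out ++ [acms_alt_marker k jl.2]
                  else out ++ [acms_alt_indent k jl.2]) out) out
        = out ++ acms_renderSegs (decide (n % 2 = 1)) true (((n / 2 : Nat) : Int) + 1) segs := by
  induction segs with
  | nil => intro out n; simp [PySem.List.enumerate_nil, acms_renderSegs]
  | cons s ss ih =>
    intro out n
    have hcast : ((n : Int) + 1) = ((n + 1 : Nat) : Int) := by push_cast; ring
    have hmod : PySem.Int.mod (n : Int) 2 = ((n % 2 : Nat) : Int) := by
      simp [PySem.Int.mod, Int.fmod_eq_emod]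
    have hdiv : PySem.Int.floordiv (n : Int) 2 = ((n / 2 : Nat) : Int) := by
      simp [PySem.Int.floordiv, Int.fdiv_eq_ediv]
    by_cases h : n % 2 = 0
    · have hcond : (PySem.Int.mod (n : Int) 2 == 0) = true := by rw [hmod, h]; norm_num
      have e1 : (decide ((n + 1) % 2 = 1)) = true := by simp; omega
      have e2 : ((n + 1) / 2 : Nat) = n / 2 := by omega
      have e0 : (decide (n % 2 = 1)) = false := by simp [h]
      have h1 := ih (out ++ s) (n + 1)
      rw [e1, e2] at h1
      simp only [PySem.List.enumerate_cons, List.foldl_cons, hcond, if_pos, hcast]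
      rw [h1, e0]
      simp [acms_renderSegs, List.append_assoc]
    · have hcond : (PySem.Int.mod (n : Int) 2 == 0) = false := by rw [hmod]; simp; omega
      have e1 : (decide ((n + 1) % 2 = 1)) = false := by simp; omega
      have e2 : ((n + 1) / 2 : Nat) = n / 2 + 1 := by omega
      have e0 : (decide (n % 2 = 1)) = true := by simp; omega
      have hin := acms_inner_fold0 (((n / 2 : Nat) : Int) + 1) s out
      simp only [PySem.List.enumerate_cons, List.foldl_cons, hcond, hdiv, hcast,
        Bool.false_eq_true, if_neg, not_false_iff]
      rw [hin]
      have h1 := ih (out ++ acms_markIndent (((n / 2 : Nat) : Int) + 1) true s) (n + 1)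
      rw [e1, e2] at h1
      rw [h1, e0]
      have e3 : ((n / 2 + 1 : Nat) : Int) = ((n / 2 : Nat) : Int) + 1 := by push_cast; ring
      rw [e3]
      simp [acms_renderSegs, List.append_assoc]

-- ===== VERDICT (by name: the statement is the Claim_ definition above) =====
theorem add_copy_markers_slim_spec : Claim_equal_add_copy_markers_slim := by
  intro s _
  unfold Spec_add_copy_markers_slim add_copy_markers_slim add_copy_markers_slim_alt
  simp only []
  congr 1
  have hA := acms_foldl_eq_rr (PySem.Str.splitlines s) [] false false 1
  have hsplit : acms_alt_split (PySem.Str.splitlines s) = acms_splitRec (PySem.Str.splitlines s) := by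
    unfold acms_alt_split
    have := acms_split_fold (PySem.Str.splitlines s) [] []
    simp only [List.nil_append] at this
    rw [this]
    obtain ⟨t, ts, ht⟩ := List.exists_cons_of_ne_nil (acms_splitRec_ne_nil (PySem.Str.splitlines s))
    simp [ht]
  have hB := acms_outer_fold (acms_alt_split (PySem.Str.splitlines s)) [] 0
  rw [show ((0 : Nat) : Int) = 0 from rfl] at hB
  rw [hB, hsplit, hA]
  have h0 := acms_rr_eq_renderSegs (PySem.Str.splitlines s) false true 1
  rw [List.nil_append, acms_rr_false _ false true 1, h0]
  norm_num
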